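-- pv_equiv track=rewrite | github.com/venkycode/TextSeg | dynamic_approach.py | processSources
-- ===== SOURCE A (Python) =====
-- def processSources(listSources, dif_factor):
--
--     new_list = []
--     new_list.append(listSources[0][0])
--     sz = len(listSources)
--     min_tuple = (-1, 99999999999999999)
--     for i in range(sz):
--         if listSources[i][1] < min_tuple[1]:
--             min_tuple = listSources[i]
--         if i != sz-1 and listSources[i+1][0]-listSources[i][0] >= dif_factor:
--             new_list.append(min_tuple[0])
--             min_tuple = (-1, 99999999999999999)
--     new_list.append(listSources[sz-1][0])
--
--     return new_list
-- ===== SOURCE B (Python) =====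
-- def processSources(listSources, dif_factor):
--     # Declarative decomposition: find gap boundaries, slice into segments,
--     # emit the (first) minimum-by-weight of each completed segment.
--     bounds = [i + 1 for i in range(len(listSources) - 1)
--               if listSources[i + 1][0] - listSources[i][0] >= dif_factor]
--     segments = [listSources[a:b] for a, b in zip([0] + bounds, bounds)]
--     return ([listSources[0][0]]
--             + [min(seg, key=lambda t: t[1])[0] for seg in segments]
--             + [listSources[-1][0]])
-- ===== Notes on version B (the rewrite author's own statement) =====
-- stated objective: alternative
-- what changed: Replaces A's single stateful loop (running minimum with a sentinel, flushed at each gap) by a declarative decomposition: compute the gap-boundary indices, slice the list into segments, and map Python's min(seg, key=...) over the completed segments.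
-- outside the precondition, e.g. on processSources([], 0): A raises IndexError, B raises IndexError
import Mathlib
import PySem

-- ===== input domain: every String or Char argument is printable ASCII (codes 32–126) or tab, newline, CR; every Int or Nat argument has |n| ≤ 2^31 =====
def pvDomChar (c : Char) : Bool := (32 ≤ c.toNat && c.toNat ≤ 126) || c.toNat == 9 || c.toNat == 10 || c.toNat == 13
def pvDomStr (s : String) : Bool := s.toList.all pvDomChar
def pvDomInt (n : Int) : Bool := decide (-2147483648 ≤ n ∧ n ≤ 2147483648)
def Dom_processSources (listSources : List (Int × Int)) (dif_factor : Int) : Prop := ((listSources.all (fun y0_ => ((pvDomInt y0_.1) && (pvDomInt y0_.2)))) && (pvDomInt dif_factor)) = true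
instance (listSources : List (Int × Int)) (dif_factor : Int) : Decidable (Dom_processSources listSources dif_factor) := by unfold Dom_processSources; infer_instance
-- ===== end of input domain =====

-- B re-implements A by a different decomposition (gap-boundary indices → slices →
-- first minimum-by-weight per completed segment) instead of A's single stateful
-- running-minimum loop; same O(n) cost ("alternative", no speed claim).

-- ===== PORT A =====
-- the loop body of A's `for i in range(sz)` (state = (new_list, min_tuple))
def pvStepA (xs : List (Int × Int)) (sz dif_factor : Int)
    (st : List Int × (Int × Int)) (i : Int) : List Int × (Int × Int) :=
  let mt := if (PySem.List.pyGetD xs i (0, 0)).2 < st.2.2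
            then PySem.List.pyGetD xs i (0, 0) else st.2
  if i ≠ sz - 1 ∧
     (PySem.List.pyGetD xs (i + 1) (0, 0)).1 - (PySem.List.pyGetD xs i (0, 0)).1 ≥ dif_factor
  then (st.1 ++ [mt.1], (-1, 99999999999999999))
  else (st.1, mt)

def processSources (listSources : List (Int × Int)) (dif_factor : Int) : List Int :=
  let new_list : List Int := [] ++ [(PySem.List.pyGetD listSources 0 (0, 0)).1]
  let sz : Int := listSources.length
  let min_tuple : Int × Int := (-1, 99999999999999999)
  let st := (PySem.List.pyRange 0 sz 1).foldl (pvStepA listSources sz dif_factor) (new_list, min_tuple)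
  st.1 ++ [(PySem.List.pyGetD listSources (sz - 1) (0, 0)).1]

-- ===== PORT B =====
-- bounds = [i + 1 for i in range(len(listSources) - 1) if listSources[i+1][0] - listSources[i][0] >= dif_factor]
def pvBounds (xs : List (Int × Int)) (dif : Int) : List Int :=
  ((PySem.List.pyRange 0 ((xs.length : Int) - 1) 1).filter
    (fun i => decide ((PySem.List.pyGetD xs (i + 1) (0, 0)).1
                      - (PySem.List.pyGetD xs i (0, 0)).1 ≥ dif))).map (fun i => i + 1)

def processSources_alt (listSources : List (Int × Int)) (dif_factor : Int) : List Int :=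
  let bounds := pvBounds listSources dif_factor
  let segments := (((0 : Int) :: bounds).zip bounds).map
    (fun ab => PySem.List.slice listSources (some ab.1) (some ab.2))
  [(PySem.List.pyGetD listSources 0 (0, 0)).1]
  ++ segments.map (fun seg => ((PySem.List.min? seg (fun t => t.2)).getD (0, 0)).1)
  ++ [(PySem.List.pyGetD listSources (-1) (0, 0)).1]

-- ===== PRECONDITION & SPEC =====
-- Python A raises IndexError on the empty list (listSources[0]); only that is excluded.
def Pre_processSources (listSources : List (Int × Int)) (dif_factor : Int) : Prop :=
  listSources ≠ []
instance (listSources : List (Int × Int)) (dif_factor : Int) : Decidable (Pre_processSources listSources dif_factor) := by unfold Pre_processSources; infer_instance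

def pvWitness_processSources : (List (Int × Int)) × Int := ([(0, 1), (5, 2)], 3)

def Spec_processSources (listSources : List (Int × Int)) (dif_factor : Int) (out : List Int) : Prop := out = processSources_alt listSources dif_factor
instance (listSources : List (Int × Int)) (dif_factor : Int) (out : List Int) : Decidable (Spec_processSources listSources dif_factor out) := by unfold Spec_processSources; infer_instance

-- ===== CLAIM (what is proved, stated in full; the proofs are below) =====
def Claim_equal_processSources : Prop := ∀ (listSources : List (Int × Int)) (dif_factor : Int), Dom_processSources listSources dif_factor → Pre_processSources listSources dif_factor → Spec_processSources listSources dif_factor (processSources listSources dif_factor)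

-- ===== LEMMAS AND PROOFS =====

def pvMMin (mt : Int × Int) (seg : List (Int × Int)) : Int × Int :=
  seg.foldl (fun m x => if x.2 < m.2 then x else m) mt

def pvUpd (mt x : Int × Int) : Int × Int := if x.2 < mt.2 then x else mt

def pvRunA (dif : Int) (mt : Int × Int) : List (Int × Int) → List Int
  | [] => []
  | [_] => []
  | x :: y :: t =>
    if y.1 - x.1 ≥ dif then (pvUpd mt x).1 :: pvRunA dif (-1, 99999999999999999) (y :: t)
    else pvRunA dif (pvUpd mt x) (y :: t)

lemma pvGetD_append_len (pre : List (Int × Int)) (x : Int × Int) (t : List (Int × Int)) (d : Int × Int) :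
    PySem.List.pyGetD (pre ++ x :: t) (pre.length : Int) d = x := by
  simp [List.getD]

lemma pvFoldA (xs : List (Int × Int)) (dif : Int) :
    ∀ (ys pre : List (Int × Int)) (acc : List Int) (mt : Int × Int), xs = pre ++ ys →
    ((PySem.List.pyRange (pre.length : Int) (xs.length : Int) 1).foldl
        (pvStepA xs (xs.length : Int) dif) (acc, mt)).1
      = acc ++ pvRunA dif mt ys := by
  intro ys
  induction ys with
  | nil =>
    intro pre acc mt h
    subst h
    rw [PySem.List.pyRange_one_eq_nil (by simp)]
    simp [pvRunA]
  | cons x t ih =>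
    intro pre acc mt h
    have hlt : (pre.length : Int) < ((xs.length : Int)) := by
      subst h; simp only [List.length_append, List.length_cons]; push_cast; omega
    rw [PySem.List.pyRange_one_cons hlt]
    rw [List.foldl_cons]
    have hx : PySem.List.pyGetD xs (pre.length : Int) (0, 0) = x := by
      rw [h]; exact pvGetD_append_len pre x t (0, 0)
    match t with
    | [] =>
      have hsz : (xs.length : Int) = (pre.length : Int) + 1 := by subst h; simp
      have hstep : pvStepA xs (xs.length : Int) dif (acc, mt) (pre.length : Int)
          = (acc, if x.2 < mt.2 then x else mt) := by
        unfold pvStepA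
        rw [hx]
        rw [if_neg (by rintro ⟨h1, -⟩; exact h1 (by omega))]
      rw [hstep, PySem.List.pyRange_one_eq_nil (by omega)]
      simp [pvRunA]
    | y :: t' =>
      have hy : PySem.List.pyGetD xs ((pre.length : Int) + 1) (0, 0) = y := by
        have : (pre.length : Int) + 1 = (((pre ++ [x]).length : ℕ) : Int) := by simp
        rw [h, this]
        have happ : pre ++ x :: y :: t' = (pre ++ [x]) ++ y :: t' := by simp
        rw [happ]
        exact pvGetD_append_len (pre ++ [x]) y t' (0, 0)
      have h' : xs = (pre ++ [x]) ++ y :: t' := by simp [h]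
      have hlen : (((pre ++ [x]).length : ℕ) : Int) = (pre.length : Int) + 1 := by simp
      have hne : (pre.length : Int) ≠ (xs.length : Int) - 1 := by
        subst h; simp; omega
      by_cases hg : y.1 - x.1 ≥ dif
      · have hstep : pvStepA xs (xs.length : Int) dif (acc, mt) (pre.length : Int)
            = (acc ++ [(if x.2 < mt.2 then x else mt).1], (-1, 99999999999999999)) := by
          unfold pvStepA
          rw [hx, hy, if_pos (And.intro hne hg)]
        rw [hstep]
        have := ih (pre ++ [x]) (acc ++ [(if x.2 < mt.2 then x else mt).1]) (-1, 99999999999999999) h'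
        rw [hlen] at this
        rw [this]
        simp [pvRunA, if_pos hg, pvUpd]
      · have hstep : pvStepA xs (xs.length : Int) dif (acc, mt) (pre.length : Int)
            = (acc, if x.2 < mt.2 then x else mt) := by
          unfold pvStepA
          rw [hx, hy, if_neg (by rintro ⟨-, h2⟩; exact hg h2)]
        rw [hstep]
        have := ih (pre ++ [x]) acc (if x.2 < mt.2 then x else mt) h'
        rw [hlen] at this
        rw [this]
        simp [pvRunA, if_neg hg, pvUpd]

lemma pvA_norm (x : Int × Int) (t : List (Int × Int)) (dif : Int) :
    processSources (x :: t) dif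
      = x.1 :: (pvRunA dif (-1, 99999999999999999) (x :: t)
        ++ [(PySem.List.pyGetD (x :: t) (((x :: t).length : Int) - 1) (0, 0)).1]) := by
  have hfold := pvFoldA (x :: t) dif (x :: t) [] ([] ++ [x.1]) (-1, 99999999999999999) (by simp)
  simp only [List.length_nil, Nat.cast_zero] at hfold
  simp only [processSources, PySem.List.pyGetD_zero_cons]
  rw [hfold]
  simp

lemma pvGetD_neg_one (xs : List (Int × Int)) (h : xs ≠ []) (d : Int × Int) :
    PySem.List.pyGetD xs (-1) d = PySem.List.pyGetD xs ((xs.length : Int) - 1) d := by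
  have hlen : 1 ≤ xs.length := List.length_pos_of_ne_nil h
  rw [PySem.List.pyGetD_neg_one xs d h]
  have h2 : ((xs.length : Int) - 1) = ((xs.length - 1 : ℕ) : Int) := by omega
  rw [h2, PySem.List.pyGetD_natCast]
  rw [List.getLast_eq_getElem]
  simp [List.getD, List.getElem?_eq_getElem (by omega : xs.length - 1 < xs.length)]

lemma pvGetD_cons_add_one (x : Int × Int) (r : List (Int × Int)) (i : Int) (hi : 0 ≤ i) (d : Int × Int) :
    PySem.List.pyGetD (x :: r) (i + 1) d = PySem.List.pyGetD r i d := by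
  lift i to ℕ using hi
  have h : (i : Int) + 1 = ((i + 1 : ℕ) : Int) := by push_cast; ring
  rw [h, PySem.List.pyGetD_natCast, PySem.List.pyGetD_natCast]
  simp

lemma pvBounds_nil (dif : Int) : pvBounds [] dif = [] := by
  simp [pvBounds, PySem.List.pyRange_one_eq_nil (by norm_num : (-1 : Int) ≤ 0)]

lemma pvBounds_single (x : Int × Int) (dif : Int) : pvBounds [x] dif = [] := by
  simp [pvBounds, PySem.List.pyRange_one_eq_nil (by norm_num : (0 : Int) ≤ 0)]

lemma pvRange_shift (n : ℕ) :
    PySem.List.pyRange 1 ((n : Int) + 1) 1 = (PySem.List.pyRange 0 (n : Int) 1).map (fun i => i + 1) := by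
  rw [PySem.List.pyRange_one, PySem.List.pyRange_one]
  have h1 : ((n : Int) + 1 - 1).toNat = n := by omega
  have h2 : ((n : Int) - 0).toNat = n := by omega
  rw [h1, h2, List.map_map]
  apply List.map_congr_left
  intro k _
  simp
  ring

lemma pvBounds_cons (x y : Int × Int) (t : List (Int × Int)) (dif : Int) :
    pvBounds (x :: y :: t) dif
      = (if y.1 - x.1 ≥ dif then [1] else []) ++ (pvBounds (y :: t) dif).map (fun i => i + 1) := by
  have hlen : (((x :: y :: t).length : ℕ) : Int) - 1 = ((t.length : Int) + 1) := by
    simp only [List.length_cons]; push_cast; omega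
  have hlen2 : (((y :: t).length : ℕ) : Int) - 1 = (t.length : Int) := by
    simp
  unfold pvBounds
  rw [hlen, hlen2]
  rw [PySem.List.pyRange_one_cons (by positivity)]
  simp only [zero_add]
  rw [pvRange_shift]
  rw [List.filter_cons, List.filter_map]
  have hp0 : PySem.List.pyGetD (x :: y :: t) (0 + 1) (0, 0) = y := by
    rw [pvGetD_cons_add_one x (y :: t) 0 le_rfl]
    simp
  have hfc : ∀ i ∈ PySem.List.pyRange 0 (t.length : Int) 1,
      ((fun i => decide ((PySem.List.pyGetD (x :: y :: t) (i + 1) (0, 0)).1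
                      - (PySem.List.pyGetD (x :: y :: t) i (0, 0)).1 ≥ dif)) ∘ (fun i => i + 1)) i
      = (fun i => decide ((PySem.List.pyGetD (y :: t) (i + 1) (0, 0)).1
                      - (PySem.List.pyGetD (y :: t) i (0, 0)).1 ≥ dif)) i := by
    intro i hi
    have h0i : 0 ≤ i := by
      have := (PySem.List.mem_pyRange_one.mp hi).1; omega
    simp only [Function.comp_apply]
    rw [pvGetD_cons_add_one x (y :: t) (i + 1) (by omega), pvGetD_cons_add_one x (y :: t) i h0i]
  rw [List.filter_congr hfc]
  rw [hp0]
  simp only [PySem.List.pyGetD_zero_cons]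
  by_cases hg : y.1 - x.1 ≥ dif
  · rw [if_pos (by simpa using hg), if_pos hg]
    simp [List.map_map]
  · rw [if_neg (by simpa using hg), if_neg hg]
    simp [List.map_map]

lemma pvBounds_pos (xs : List (Int × Int)) (dif : Int) :
    ∀ b ∈ pvBounds xs dif, 1 ≤ b := by
  intro b hb
  simp only [pvBounds, List.mem_map, List.mem_filter] at hb
  obtain ⟨i, ⟨hi, -⟩, rfl⟩ := hb
  have := (PySem.List.mem_pyRange_one.mp hi).1
  omega

lemma pvMin?_eq_mmin (t : List (Int × Int)) : ∀ m : Int × Int,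
    PySem.List.min? (m :: t) (fun p => p.2) = some (pvMMin m t) := by
  induction t with
  | nil => intro m; simp [PySem.List.min?, pvMMin]
  | cons z t ih =>
    intro m
    have hmm : pvMMin m (z :: t) = pvMMin (if z.2 < m.2 then z else m) t := by
      simp [pvMMin]
    have step : PySem.List.min? (m :: z :: t) (fun p => p.2)
        = PySem.List.min? ((if z.2 < m.2 then z else m) :: t) (fun p => p.2) := by
      by_cases h : z.2 < m.2 <;> simp [PySem.List.min?, h]
    rw [step, ih, hmm]

lemma pvMMin_sentinel (z : Int × Int) (r : List (Int × Int)) (hz : z.2 < 99999999999999999) :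
    pvMMin (-1, 99999999999999999) (z :: r) = pvMMin z r := by
  simp [pvMMin, if_pos hz]

lemma pvSlice_shift (x : Int × Int) (r : List (Int × Int)) (a b : Int) (ha : 0 ≤ a) (hb : 0 ≤ b) :
    PySem.List.slice (x :: r) (some (a + 1)) (some (b + 1)) = PySem.List.slice r (some a) (some b) := by
  rw [PySem.List.slice_toNat _ (by omega) (by omega), PySem.List.slice_toNat _ ha hb]
  have h1 : (a + 1).toNat = a.toNat + 1 := by omega
  have h2 : (b + 1).toNat - (a.toNat + 1) = b.toNat - a.toNat := by omega
  rw [h1, h2]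
  simp

lemma pvSlice_zero_succ (x : Int × Int) (r : List (Int × Int)) (b : Int) (hb : 0 ≤ b) :
    PySem.List.slice (x :: r) (some 0) (some (b + 1)) = x :: PySem.List.slice r (some 0) (some b) := by
  rw [PySem.List.slice_toNat _ le_rfl (by omega), PySem.List.slice_toNat _ le_rfl hb]
  have h1 : (b + 1).toNat = b.toNat + 1 := by omega
  simp [h1]

def pvMid (dif : Int) (ys : List (Int × Int)) : List Int :=
  (((0 : Int) :: pvBounds ys dif).zip (pvBounds ys dif)).map
    (fun ab => ((PySem.List.min? (PySem.List.slice ys (some ab.1) (some ab.2)) (fun t => t.2)).getD (0, 0)).1)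

def pvBMid (dif : Int) (mt : Int × Int) (ys : List (Int × Int)) : List Int :=
  match pvBounds ys dif with
  | [] => []
  | b :: bs =>
    (pvMMin mt (PySem.List.slice ys (some 0) (some b))).1 ::
      ((b :: bs).zip bs).map
        (fun ab => ((PySem.List.min? (PySem.List.slice ys (some ab.1) (some ab.2)) (fun t => t.2)).getD (0, 0)).1)

-- the zipped pairs of bounds, shifted by one, give the same minima on the tail list
lemma pvZip_shift (x : Int × Int) (r : List (Int × Int)) (l l' : List Int)
    (hl : ∀ a ∈ l, 0 ≤ a) (hl' : ∀ b ∈ l', 0 ≤ b) :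
    ((l.map (fun i => i + 1)).zip (l'.map (fun i => i + 1))).map
      (fun ab => ((PySem.List.min? (PySem.List.slice (x :: r) (some ab.1) (some ab.2)) (fun t => t.2)).getD (0, 0)).1)
    = (l.zip l').map
      (fun ab => ((PySem.List.min? (PySem.List.slice r (some ab.1) (some ab.2)) (fun t => t.2)).getD (0, 0)).1) := by
  rw [List.zip_map, List.map_map]
  apply List.map_congr_left
  intro p hp
  obtain ⟨h1, h2⟩ := List.of_mem_zip hp
  simp only [Function.comp_apply, Prod.map]
  rw [pvSlice_shift x r p.1 p.2 (hl _ h1) (hl' _ h2)]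

lemma pvMid_eq_bmid (dif : Int) (ys : List (Int × Int))
    (hs : ∀ z ∈ ys, z.2 < 99999999999999999) :
    pvMid dif ys = pvBMid dif (-1, 99999999999999999) ys := by
  cases hb : pvBounds ys dif with
  | nil => simp [pvMid, pvBMid, hb]
  | cons b bs =>
    have hys : ys ≠ [] := by
      intro h; rw [h, pvBounds_nil] at hb; simp at hb
    have hb1 : 1 ≤ b := pvBounds_pos ys dif b (by rw [hb]; exact List.mem_cons_self ..)
    have hseg : PySem.List.slice ys (some 0) (some b) = ys.take b.toNat := by
      rw [PySem.List.slice_toNat _ le_rfl (by omega)]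
      simp
    obtain ⟨z, r, hzr⟩ : ∃ z r, PySem.List.slice ys (some 0) (some b) = z :: r := by
      rw [hseg]
      cases ys with
      | nil => exact absurd rfl hys
      | cons w ws =>
        have : b.toNat = b.toNat - 1 + 1 := by omega
        rw [this, List.take_succ_cons]
        exact ⟨w, _, rfl⟩
    have hz : z.2 < 99999999999999999 := by
      apply hs
      have : z ∈ PySem.List.slice ys (some 0) (some b) := by rw [hzr]; exact List.mem_cons_self ..
      exact PySem.List.mem_of_mem_slice _ _ _ this
    simp only [pvMid, pvBMid, hb]
    rw [List.zip_cons_cons, List.map_cons, hzr, pvMin?_eq_mmin, pvMMin_sentinel z r hz]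
    rfl

lemma pvBMid_cons_gap (dif : Int) (x y : Int × Int) (t : List (Int × Int)) (mt : Int × Int)
    (hg : y.1 - x.1 ≥ dif) :
    pvBMid dif mt (x :: y :: t) = (pvUpd mt x).1 :: pvMid dif (y :: t) := by
  have hb := pvBounds_cons x y t dif
  rw [if_pos hg] at hb
  simp only [pvBMid, hb, List.cons_append, List.nil_append]
  have hsl : PySem.List.slice (x :: y :: t) (some 0) (some 1) = [x] := by
    rw [PySem.List.slice_toNat _ le_rfl (by norm_num)]
    simp
  rw [hsl]
  have hmm : pvMMin mt [x] = pvUpd mt x := by simp [pvMMin, pvUpd]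
  rw [hmm]
  congr 1
  have : (1 : Int) :: (pvBounds (y :: t) dif).map (fun i => i + 1)
      = ((0 :: pvBounds (y :: t) dif).map (fun i => i + 1)) := by simp
  rw [this, pvZip_shift x (y :: t) _ _
    (by intro a ha; rcases List.mem_cons.mp ha with h | h; · omega
        · have := pvBounds_pos _ _ _ h; omega)
    (by intro a ha; have := pvBounds_pos _ _ _ ha; omega)]
  rfl

lemma pvBMid_cons_nogap (dif : Int) (x y : Int × Int) (t : List (Int × Int)) (mt : Int × Int)
    (hg : ¬ y.1 - x.1 ≥ dif) :
    pvBMid dif mt (x :: y :: t) = pvBMid dif (pvUpd mt x) (y :: t) := by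
  have hb := pvBounds_cons x y t dif
  rw [if_neg hg] at hb
  cases hb' : pvBounds (y :: t) dif with
  | nil =>
    rw [hb'] at hb
    simp only [pvBMid, hb, hb']
    simp
  | cons b bs =>
    rw [hb'] at hb
    have hb1 : 1 ≤ b := pvBounds_pos _ _ b (by rw [hb']; exact List.mem_cons_self ..)
    simp only [pvBMid, hb, hb', List.map_cons, List.nil_append]
    rw [pvSlice_zero_succ x (y :: t) b (by omega)]
    have hmm : pvMMin mt (x :: PySem.List.slice (y :: t) (some 0) (some b))
        = pvMMin (pvUpd mt x) (PySem.List.slice (y :: t) (some 0) (some b)) := by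
      simp [pvMMin, pvUpd]
    rw [hmm]
    congr 1
    have : (b + 1) :: (bs.map (fun i => i + 1)) = ((b :: bs).map (fun i => i + 1)) := by simp
    rw [this, pvZip_shift x (y :: t) _ _
      (by intro a ha; have := pvBounds_pos _ _ a (by rw [hb']; exact ha); omega)
      (by intro a ha; have := pvBounds_pos _ _ a (by rw [hb']; exact List.mem_cons_of_mem _ ha); omega)]

lemma pvBMid_eq_runA (dif : Int) : ∀ (ys : List (Int × Int)),
    (∀ z ∈ ys, z.2 < 99999999999999999) →
    ∀ mt : Int × Int, pvBMid dif mt ys = pvRunA dif mt ys := by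
  intro ys
  induction ys with
  | nil => intro _ mt; simp [pvBMid, pvBounds_nil, pvRunA]
  | cons x t ih =>
    intro hs mt
    match t with
    | [] => simp [pvBMid, pvBounds_single, pvRunA]
    | y :: t' =>
      have hs' : ∀ z ∈ y :: t', z.2 < 99999999999999999 := by
        intro z hz; exact hs z (List.mem_cons_of_mem _ hz)
      by_cases hg : y.1 - x.1 ≥ dif
      · rw [pvBMid_cons_gap dif x y t' mt hg, pvMid_eq_bmid dif _ hs',
          ih hs' (-1, 99999999999999999)]
        simp [pvRunA, if_pos hg]
      · rw [pvBMid_cons_nogap dif x y t' mt hg, ih hs' (pvUpd mt x)]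
        simp [pvRunA, if_neg hg]

lemma pvB_norm (x : Int × Int) (t : List (Int × Int)) (dif : Int) :
    processSources_alt (x :: t) dif
      = x.1 :: (pvMid dif (x :: t) ++ [(PySem.List.pyGetD (x :: t) (-1) (0, 0)).1]) := by
  simp [processSources_alt, pvMid, List.map_map, Function.comp]

-- ===== VERDICT (by name: the statement is the Claim_ definition above) =====
theorem processSources_spec : Claim_equal_processSources := by
  intro xs dif hdom hpre
  unfold Spec_processSources
  cases xs with
  | nil => exact absurd rfl hpre
  | cons x t =>
    have hs : ∀ z ∈ x :: t, z.2 < 99999999999999999 := by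
      intro z hz
      simp only [Dom_processSources, Bool.and_eq_true, List.all_eq_true] at hdom
      have := hdom.1 z hz
      simp only [pvDomInt, decide_eq_true_eq] at this
      omega
    rw [pvA_norm, pvB_norm, pvMid_eq_bmid dif _ hs, pvBMid_eq_runA dif _ hs,
      pvGetD_neg_one _ (List.cons_ne_nil x t)]
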